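-- pv_equiv track=rewrite | github.com/wykthor-btracker/PAA---Calculadora | multi_chain_matrix.py | get_optimal_order
-- ===== SOURCE A (Python) =====
-- def f(i,j):
--     return (str(i)+","+str(j))
--
-- def get_optimal_order(s, i, j):
--     res = ""
--     if i == j:
--         return ("A"+str(j))
--     else:
--         res += "("
--         res += get_optimal_order(s, i, s[f(i, j)])
--         res += get_optimal_order(s, s[f(i, j)]+1, j)
--         res +=  ")"
--         return res
-- ===== SOURCE B (Python) =====
-- def get_optimal_order(s, i, j):
--     # Iterative explicit-stack traversal instead of recursion; same return value.
--     out = ""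
--     stack = [(i, j)]
--     while stack:
--         item = stack.pop()
--         if isinstance(item, str):
--             out += item
--         else:
--             a, b = item
--             if a == b:
--                 out += "A" + str(b)
--             else:
--                 k = s[str(a) + "," + str(b)]
--                 stack.append(")")
--                 stack.append((k + 1, b))
--                 stack.append((a, k))
--                 stack.append("(")
--     return out
-- ===== Notes on version B (the rewrite author's own statement) =====
-- stated objective: alternative
-- what changed: Replaces the recursive string-building with an iterative explicit-stack traversal that pushes subproblems and literal parenthesis tokens and emits them left-to-right into one accumulator. Pre_ is exactly the set of inputs on which A returns: it excludes only the inputs on which the recursion reaches a missing split key (KeyError) or the split graph has a reachable cycle (unbounded recursion, RecursionError).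
import Mathlib
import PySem

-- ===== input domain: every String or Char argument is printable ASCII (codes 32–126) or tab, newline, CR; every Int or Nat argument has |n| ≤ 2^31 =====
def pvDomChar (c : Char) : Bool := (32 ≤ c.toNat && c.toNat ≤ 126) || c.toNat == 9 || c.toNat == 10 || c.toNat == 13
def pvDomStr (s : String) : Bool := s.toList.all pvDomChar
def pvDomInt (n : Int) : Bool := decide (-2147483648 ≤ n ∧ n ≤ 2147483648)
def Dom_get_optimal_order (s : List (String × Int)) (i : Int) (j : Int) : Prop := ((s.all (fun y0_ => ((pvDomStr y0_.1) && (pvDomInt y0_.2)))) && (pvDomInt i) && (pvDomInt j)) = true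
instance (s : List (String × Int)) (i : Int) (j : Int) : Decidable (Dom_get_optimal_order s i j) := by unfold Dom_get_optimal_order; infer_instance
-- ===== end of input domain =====

-- B replaces the recursion by an explicit-stack iterative traversal (alternative decomposition, same cost).

-- ===== PORT A =====
-- port of helper f: the "i,j" dict key
def pvKey (i j : Int) : String := PySem.Int.toStr i ++ "," ++ PySem.Int.toStr j

-- s[f(a,b)]: first-match association-list lookup, as Python's dict lookup
def pvSplit? (s : List (String × Int)) (a b : Int) : Option Int :=
  (PySem.Dict.mk s).get? (pvKey a b)

-- fuel bound used by both ports' totality devices (≥ the number of distinct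
-- reachable subproblems, see pvUB_card below)
def pvN (s : List (String × Int)) : Nat := (s.length + 1) * (s.length + 1)

-- the recursion of A; fuel only makes it total (inside Pre_ the fuel pvN s suffices,
-- see pv_main); on a missing key Python raises KeyError — outside Pre_, "" stands in.
def pvGoA (s : List (String × Int)) : Nat → Int → Int → String
  | fuel, i, j =>
    if i = j then "A" ++ PySem.Int.toStr j
    else
      match fuel with
      | 0 => ""   -- fuel guard (Python recurses without bound here; outside Pre_)
      | Nat.succ f =>
        match pvSplit? s i j with
        | none => ""   -- Python raises KeyError; outside Pre_
        | some k => "(" ++ pvGoA s f i k ++ pvGoA s f (k + 1) j ++ ")"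

def get_optimal_order (s : List (String × Int)) (i : Int) (j : Int) : String :=
  pvGoA s (pvN s) i j

-- ===== PORT B =====
-- a stack item of B: either a literal token or a subproblem (a, b)
inductive PvTok where
  | str : String → PvTok
  | sub : Int → Int → PvTok
deriving DecidableEq, Repr

-- the while loop of B; fuel only makes it total (4 ^ pvN s pops suffice inside Pre_)
def pvLoopB (s : List (String × Int)) : Nat → List PvTok → String → String
  | _, [], out => out
  | 0, _, out => out   -- fuel guard (Python loops without bound here; outside Pre_)
  | Nat.succ f, t :: stack, out =>
    match t with
    | .str x => pvLoopB s f stack (out ++ x)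
    | .sub a b =>
      if a = b then pvLoopB s f stack (out ++ ("A" ++ PySem.Int.toStr b))
      else
        match pvSplit? s a b with
        | none => out   -- Python raises KeyError; outside Pre_
        | some k =>
          pvLoopB s f (.str "(" :: .sub a k :: .sub (k + 1) b :: .str ")" :: stack) out

def get_optimal_order_alt (s : List (String × Int)) (i : Int) (j : Int) : String :=
  pvLoopB s (4 ^ pvN s) [.sub i j] ""

-- ===== PRECONDITION & SPEC =====
-- the split graph on subproblems: (a,b) calls (a,k) and (k+1,b) when k = s["a,b"]
def pvChildren (s : List (String × Int)) (p : Int × Int) : Finset (Int × Int) :=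
  if p.1 = p.2 then ∅
  else
    match pvSplit? s p.1 p.2 with
    | some k => {(p.1, k), (k + 1, p.2)}
    | none => ∅

def pvStep (s : List (String × Int)) (A : Finset (Int × Int)) : Finset (Int × Int) :=
  A ∪ A.biUnion (pvChildren s)

-- everything reachable from A0 in the split graph (pvN s iterations saturate, see pvSat)
def pvReachA (s : List (String × Int)) (A0 : Finset (Int × Int)) : Finset (Int × Int) :=
  (pvStep s)^[pvN s] A0

def pvReach (s : List (String × Int)) (p : Int × Int) : Finset (Int × Int) :=
  pvReachA s {p}

-- reachable from p in at least one step
def pvReachPlus (s : List (String × Int)) (p : Int × Int) : Finset (Int × Int) :=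
  pvReachA s (pvChildren s p)

-- every subproblem reachable from p is solved (diagonal, or its split key present)
-- and is on no cycle of the split graph
def pvGoodAll (s : List (String × Int)) (p : Int × Int) : Prop :=
  ∀ q ∈ pvReach s p,
    (q.1 = q.2 ∨ (pvSplit? s q.1 q.2).isSome = true) ∧ q ∉ pvReachPlus s q

-- Pre_ holds exactly when A returns: it excludes only the inputs on which the
-- recursion reaches a missing split key (Python raises KeyError) or the split graph
-- has a reachable cycle (the recursion never bottoms out: RecursionError).
def Pre_get_optimal_order (s : List (String × Int)) (i : Int) (j : Int) : Prop :=
  pvGoodAll s (i, j)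

instance (s : List (String × Int)) (i : Int) (j : Int) : Decidable (Pre_get_optimal_order s i j) := by
  unfold Pre_get_optimal_order pvGoodAll; infer_instance

def pvWitness_get_optimal_order : (List (String × Int)) × Int × Int := ([("0,1", 0)], 0, 1)

def Spec_get_optimal_order (s : List (String × Int)) (i : Int) (j : Int) (out : String) : Prop := out = get_optimal_order_alt s i j
instance (s : List (String × Int)) (i : Int) (j : Int) (out : String) : Decidable (Spec_get_optimal_order s i j out) := by unfold Spec_get_optimal_order; infer_instance

-- ===== CLAIM (what is proved, stated in full; the proofs are below) =====
def Claim_equal_get_optimal_order : Prop := ∀ (s : List (String × Int)) (i : Int) (j : Int), Dom_get_optimal_order s i j → Pre_get_optimal_order s i j → Spec_get_optimal_order s i j (get_optimal_order s i j)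

-- ===== LEMMAS AND PROOFS =====

-- unfolding lemmas for the two ports
lemma pvGoA_self (s : List (String × Int)) (fuel : Nat) (a : Int) :
    pvGoA s fuel a a = "A" ++ PySem.Int.toStr a := by
  cases fuel <;> simp [pvGoA]

lemma pvGoA_ne (s : List (String × Int)) (f : Nat) {a b k : Int} (h : a ≠ b)
    (hget : pvSplit? s a b = some k) :
    pvGoA s (f + 1) a b = "(" ++ pvGoA s f a k ++ pvGoA s f (k + 1) b ++ ")" := by
  simp [pvGoA, h, hget]

lemma pvLoopB_nil (s : List (String × Int)) (g : Nat) (out : String) :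
    pvLoopB s g [] out = out := by
  cases g <;> rfl

lemma pvLoopB_str (s : List (String × Int)) (f : Nat) (x : String) (st : List PvTok)
    (out : String) : pvLoopB s (f + 1) (PvTok.str x :: st) out = pvLoopB s f st (out ++ x) := rfl

lemma pvLoopB_sub_self (s : List (String × Int)) (f : Nat) (a : Int) (st : List PvTok)
    (out : String) :
    pvLoopB s (f + 1) (PvTok.sub a a :: st) out =
      pvLoopB s f st (out ++ ("A" ++ PySem.Int.toStr a)) := by
  simp [pvLoopB]

lemma pvLoopB_sub_ne (s : List (String × Int)) (f : Nat) {a b k : Int} (h : a ≠ b)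
    (hget : pvSplit? s a b = some k) (st : List PvTok) (out : String) :
    pvLoopB s (f + 1) (PvTok.sub a b :: st) out =
      pvLoopB s f
        (PvTok.str "(" :: PvTok.sub a k :: PvTok.sub (k + 1) b :: PvTok.str ")" :: st) out := by
  simp [pvLoopB, h, hget]

-- basic monotonicity of the one-step closure operator
lemma pvStep_mono (s : List (String × Int)) {A B : Finset (Int × Int)} (h : A ⊆ B) :
    pvStep s A ⊆ pvStep s B :=
  Finset.union_subset_union h (Finset.biUnion_subset_biUnion_of_subset_left _ h)

lemma subset_pvStep (s : List (String × Int)) (A : Finset (Int × Int)) : A ⊆ pvStep s A :=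
  Finset.subset_union_left

lemma pvChildren_subset_pvStep (s : List (String × Int)) {A : Finset (Int × Int)}
    {q : Int × Int} (hq : q ∈ A) : pvChildren s q ⊆ pvStep s A :=
  subset_trans (Finset.subset_biUnion_of_mem _ hq) Finset.subset_union_right

lemma subset_pvIter (s : List (String × Int)) (A : Finset (Int × Int)) (n : Nat) :
    A ⊆ (pvStep s)^[n] A := by
  induction n with
  | zero => simp
  | succ n ih =>
    rw [Function.iterate_succ_apply']
    exact subset_trans ih (subset_pvStep s _)

-- closed sets absorb the closure
def pvClosed (s : List (String × Int)) (S : Finset (Int × Int)) : Prop :=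
  ∀ q ∈ S, pvChildren s q ⊆ S

lemma pvStep_eq_of_closed (s : List (String × Int)) {S : Finset (Int × Int)}
    (h : pvClosed s S) : pvStep s S = S := by
  apply Finset.Subset.antisymm
  · exact Finset.union_subset (Finset.Subset.refl S) (Finset.biUnion_subset.2 h)
  · exact subset_pvStep s S

lemma pvIter_subset_of_closed (s : List (String × Int)) {A S : Finset (Int × Int)}
    (hA : A ⊆ S) (hS : pvClosed s S) (n : Nat) : (pvStep s)^[n] A ⊆ S := by
  induction n with
  | zero => simpa using hA
  | succ n ih =>
    rw [Function.iterate_succ_apply']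
    rw [← pvStep_eq_of_closed s hS]
    exact pvStep_mono s ih

-- the universe: all subproblems reachable from p have components among
-- {p.1} ∪ (values+1) and {p.2} ∪ values
def pvVals (s : List (String × Int)) : Finset Int := (s.map Prod.snd).toFinset

def pvUB (s : List (String × Int)) (p : Int × Int) : Finset (Int × Int) :=
  ({p.1} ∪ (pvVals s).image (· + 1)) ×ˢ ({p.2} ∪ pvVals s)

lemma pvSplit?_mem (s : List (String × Int)) {a b k : Int} (h : pvSplit? s a b = some k) :
    k ∈ pvVals s := by
  simp only [pvSplit?] at h
  simp only [pvVals, List.mem_toFinset, List.mem_map]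
  induction s with
  | nil => exact nomatch h
  | cons hd tl ih =>
    rw [PySem.Dict.get?_mk_cons] at h
    by_cases he : hd.1 == pvKey a b
    · simp [he] at h
      exact ⟨hd, List.mem_cons_self, h⟩
    · simp [he] at h
      obtain ⟨x, hx, hxe⟩ := ih h
      exact ⟨x, List.mem_cons_of_mem _ hx, hxe⟩

lemma mem_pvUB_self (s : List (String × Int)) (p : Int × Int) : p ∈ pvUB s p := by
  simp [pvUB]

lemma pvChildren_mem_pvUB (s : List (String × Int)) {r p q : Int × Int}
    (hp : p ∈ pvUB s r) (hq : q ∈ pvChildren s p) : q ∈ pvUB s r := by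
  simp only [pvUB, Finset.mem_product, Finset.mem_union, Finset.mem_singleton,
    Finset.mem_image] at hp ⊢
  simp only [pvChildren] at hq
  split at hq
  · simp at hq
  · rename_i hne
    cases hsp : pvSplit? s p.1 p.2 with
    | none => rw [hsp] at hq; simp at hq
    | some k =>
      rw [hsp] at hq
      have hk : k ∈ pvVals s := pvSplit?_mem s hsp
      simp only [Finset.mem_insert, Finset.mem_singleton] at hq
      rcases hq with rfl | rfl
      · exact ⟨hp.1, Or.inr hk⟩
      · exact ⟨Or.inr ⟨k, hk, rfl⟩, hp.2⟩

lemma pvStep_pvUB (s : List (String × Int)) {r : Int × Int} {A : Finset (Int × Int)}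
    (h : A ⊆ pvUB s r) : pvStep s A ⊆ pvUB s r := by
  apply Finset.union_subset h
  apply Finset.biUnion_subset.2
  intro p hp q hq
  exact pvChildren_mem_pvUB s (h hp) hq

lemma pvIter_pvUB (s : List (String × Int)) {r : Int × Int} {A : Finset (Int × Int)}
    (h : A ⊆ pvUB s r) (n : Nat) : (pvStep s)^[n] A ⊆ pvUB s r := by
  induction n with
  | zero => simpa using h
  | succ n ih => rw [Function.iterate_succ_apply']; exact pvStep_pvUB s ih

lemma pvUB_card (s : List (String × Int)) (p : Int × Int) : (pvUB s p).card ≤ pvN s := by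
  rw [pvUB, Finset.card_product, pvN]
  have hv : (pvVals s).card ≤ s.length := by
    calc (pvVals s).card ≤ (s.map Prod.snd).length := List.toFinset_card_le _
    _ = s.length := List.length_map _
  apply Nat.mul_le_mul
  · calc ({p.1} ∪ (pvVals s).image (· + 1)).card
        ≤ ({p.1} : Finset Int).card + ((pvVals s).image (· + 1)).card := Finset.card_union_le _ _
    _ ≤ 1 + (pvVals s).card := by
        simp only [Finset.card_singleton]
        exact Nat.add_le_add_left (Finset.card_image_le) 1
    _ ≤ 1 + s.length := Nat.add_le_add_left hv 1
    _ = s.length + 1 := Nat.add_comm 1 _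
  · calc ({p.2} ∪ pvVals s).card
        ≤ ({p.2} : Finset Int).card + (pvVals s).card := Finset.card_union_le _ _
    _ = 1 + (pvVals s).card := by rw [Finset.card_singleton]
    _ ≤ 1 + s.length := Nat.add_le_add_left hv 1
    _ = s.length + 1 := Nat.add_comm 1 _

-- saturation: pvN s iterations reach a fixpoint, so the closure is closed
lemma pvSat (s : List (String × Int)) {r : Int × Int} {A : Finset (Int × Int)}
    (hA : A ⊆ pvUB s r) : pvClosed s ((pvStep s)^[pvN s] A) := by
  have key : ∀ n : Nat, (pvStep s)^[n] A = (pvStep s)^[n + 1] A ∨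
      A.card + n ≤ ((pvStep s)^[n] A).card := by
    intro n
    induction n with
    | zero =>
      by_cases h : (pvStep s)^[0] A = (pvStep s)^[1] A
      · exact Or.inl h
      · right; simp
    | succ n ih =>
      by_cases h : (pvStep s)^[n + 1] A = (pvStep s)^[n + 2] A
      · exact Or.inl h
      · right
        rcases ih with hfix | hcard
        · exfalso
          apply h
          rw [Function.iterate_succ_apply', Function.iterate_succ_apply']
          exact congrArg (pvStep s) hfix
        · by_cases hfix : (pvStep s)^[n] A = (pvStep s)^[n + 1] A
          · exfalso
            apply h
            rw [Function.iterate_succ_apply', Function.iterate_succ_apply']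
            exact congrArg (pvStep s) hfix
          · have hsub : (pvStep s)^[n] A ⊂ (pvStep s)^[n + 1] A := by
              refine ⟨?_, fun hcontra => hfix ?_⟩
              · rw [Function.iterate_succ_apply']
                exact subset_pvStep s _
              · exact Finset.Subset.antisymm (by
                  rw [Function.iterate_succ_apply']; exact subset_pvStep s _) hcontra
            have := Finset.card_lt_card hsub
            omega
    -- end of key
  have hfixN : (pvStep s)^[pvN s] A = (pvStep s)^[pvN s + 1] A := by
    rcases key (pvN s) with h | h
    · exact h
    · -- card forces A = ∅, then everything is ∅
      have hle : ((pvStep s)^[pvN s] A).card ≤ pvN s :=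
        le_trans (Finset.card_le_card (pvIter_pvUB s hA (pvN s))) (pvUB_card s r)
      have hA0 : A.card = 0 := by omega
      have hAe : A = ∅ := Finset.card_eq_zero.1 hA0
      subst hAe
      have hstep : pvStep s ∅ = ∅ := by simp [pvStep]
      have : ∀ n : Nat, (pvStep s)^[n] (∅ : Finset (Int × Int)) = ∅ := by
        intro n
        induction n with
        | zero => rfl
        | succ n ih => rw [Function.iterate_succ_apply', ih, hstep]
      rw [this, this]
  intro q hq
  have h2 : pvStep s ((pvStep s)^[pvN s] A) = (pvStep s)^[pvN s + 1] A :=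
    (Function.iterate_succ_apply' (pvStep s) (pvN s) A).symm
  have h3 : pvChildren s q ⊆ pvStep s ((pvStep s)^[pvN s] A) := pvChildren_subset_pvStep s hq
  rw [h2, ← hfixN] at h3
  exact h3

-- reach properties
lemma mem_pvReach_self (s : List (String × Int)) (p : Int × Int) : p ∈ pvReach s p :=
  subset_pvIter s {p} (pvN s) (Finset.mem_singleton_self p)

lemma pvChildren_subset_pvUB_self (s : List (String × Int)) (p : Int × Int) :
    pvChildren s p ⊆ pvUB s p := fun _ hq => pvChildren_mem_pvUB s (mem_pvUB_self s p) hq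

lemma pvReach_closed (s : List (String × Int)) (p : Int × Int) : pvClosed s (pvReach s p) :=
  pvSat s (by simpa using mem_pvUB_self s p)

lemma pvReachPlus_closed (s : List (String × Int)) (p : Int × Int) :
    pvClosed s (pvReachPlus s p) :=
  pvSat s (pvChildren_subset_pvUB_self s p)

lemma pvChildren_subset_pvReach (s : List (String × Int)) (p : Int × Int) :
    pvChildren s p ⊆ pvReach s p :=
  pvReach_closed s p p (mem_pvReach_self s p)

lemma pvReach_child_subset (s : List (String × Int)) {p q : Int × Int}
    (hq : q ∈ pvChildren s p) : pvReach s q ⊆ pvReach s p :=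
  pvIter_subset_of_closed s (by simpa using pvChildren_subset_pvReach s p hq)
    (pvReach_closed s p) (pvN s)

lemma pvReach_child_subset_plus (s : List (String × Int)) {p q : Int × Int}
    (hq : q ∈ pvChildren s p) : pvReach s q ⊆ pvReachPlus s p :=
  pvIter_subset_of_closed s (by simpa using subset_pvIter s (pvChildren s p) (pvN s) hq)
    (pvReachPlus_closed s p) (pvN s)

lemma pvGoodAll_child (s : List (String × Int)) {p q : Int × Int}
    (h : pvGoodAll s p) (hq : q ∈ pvChildren s p) : pvGoodAll s q :=
  fun r hr => h r (pvReach_child_subset s hq hr)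

lemma pvCard_child_lt (s : List (String × Int)) {p q : Int × Int}
    (h : pvGoodAll s p) (hq : q ∈ pvChildren s p) :
    (pvReach s q).card < (pvReach s p).card := by
  apply Finset.card_lt_card
  refine ⟨pvReach_child_subset s hq, fun hcontra => ?_⟩
  have hp : p ∈ pvReach s q := hcontra (mem_pvReach_self s p)
  have : p ∈ pvReachPlus s p := pvReach_child_subset_plus s hq hp
  exact (h p (mem_pvReach_self s p)).2 this

lemma pvCard_pos (s : List (String × Int)) (p : Int × Int) : 0 < (pvReach s p).card :=
  Finset.card_pos.2 ⟨p, mem_pvReach_self s p⟩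

lemma pvCard_le_pvN (s : List (String × Int)) (p : Int × Int) :
    (pvReach s p).card ≤ pvN s :=
  le_trans (Finset.card_le_card (pvIter_pvUB s (by simpa using mem_pvUB_self s p) (pvN s)))
    (pvUB_card s p)

-- the main simulation invariant: with enough fuel A's recursion is stable and
-- B's loop consumes one subtree and emits exactly A's string for it
lemma pv_main (s : List (String × Int)) :
    ∀ n : Nat, ∀ a b : Int, pvGoodAll s (a, b) → (pvReach s (a, b)).card ≤ n →
      (∀ fuel : Nat, n ≤ fuel → pvGoA s fuel a b = pvGoA s n a b) ∧
      (∃ e : Nat, e ≤ 4 ^ n ∧ ∀ g : Nat, ∀ st out,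
        pvLoopB s (e + g) (PvTok.sub a b :: st) out = pvLoopB s g st (out ++ pvGoA s n a b)) := by
  intro n
  induction n using Nat.strong_induction_on with
  | _ n ih =>
    intro a b hgood hcard
    have hn1 : 1 ≤ n := le_trans (pvCard_pos s (a, b)) hcard
    by_cases heq : a = b
    · subst heq
      refine ⟨fun fuel _ => by rw [pvGoA_self, pvGoA_self], 1, Nat.one_le_pow _ _ (by omega), ?_⟩
      intro g st out
      have h1 : 1 + g = g + 1 := Nat.add_comm 1 g
      rw [h1, pvLoopB_sub_self, pvGoA_self]
    · have hself := hgood (a, b) (mem_pvReach_self s (a, b))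
      rcases hself.1 with habs | hsome
      · exact absurd habs heq
      · obtain ⟨k, hk⟩ := Option.isSome_iff_exists.1 hsome
        have hch : pvChildren s (a, b) = {(a, k), (k + 1, b)} := by
          simp [pvChildren, heq, hk]
        have h1 : (a, k) ∈ pvChildren s (a, b) := by rw [hch]; simp
        have h2 : (k + 1, b) ∈ pvChildren s (a, b) := by rw [hch]; simp
        obtain ⟨m, hm⟩ : ∃ m, n = m + 1 := ⟨n - 1, by omega⟩
        have hc1 : (pvReach s (a, k)).card ≤ m := by
          have := pvCard_child_lt s hgood h1; omega
        have hc2 : (pvReach s (k + 1, b)).card ≤ m := by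
          have := pvCard_child_lt s hgood h2; omega
        have ih1 := ih m (by omega) a k (pvGoodAll_child s hgood h1) hc1
        have ih2 := ih m (by omega) (k + 1) b (pvGoodAll_child s hgood h2) hc2
        obtain ⟨e1, he1, hl1⟩ := ih1.2
        obtain ⟨e2, he2, hl2⟩ := ih2.2
        have hA : ∀ fuel : Nat, n ≤ fuel → pvGoA s fuel a b = pvGoA s n a b := by
          intro fuel hfuel
          obtain ⟨f, rfl⟩ : ∃ f, fuel = f + 1 := ⟨fuel - 1, by omega⟩
          rw [hm, pvGoA_ne s f heq hk, pvGoA_ne s m heq hk,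
            ih1.1 f (by omega), ih1.1 m (by omega), ih2.1 f (by omega), ih2.1 m (by omega)]
        have hm1 : 1 ≤ m := le_trans (pvCard_pos s (a, k)) hc1
        refine ⟨hA, e1 + e2 + 3, ?_, ?_⟩
        · have h4 : 4 ^ 1 ≤ 4 ^ m := Nat.pow_le_pow_right (by omega) hm1
          have h5 : 4 ^ 1 = 4 := by norm_num
          have h6 : 4 ^ n = 4 ^ m * 4 := by rw [hm, pow_succ]
          omega
        · intro g st out
          have hfu : e1 + e2 + 3 + g = (e1 + (e2 + (g + 1)) + 1) + 1 := by omega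
          rw [hfu, pvLoopB_sub_ne s _ heq hk, pvLoopB_str,
            hl1 (e2 + (g + 1)) _ _, hl2 (g + 1) _ _, pvLoopB_str,
            hm, pvGoA_ne s m heq hk]
          simp [String.append_assoc]

-- ===== VERDICT (by name: the statement is the Claim_ definition above) =====
theorem get_optimal_order_spec : Claim_equal_get_optimal_order := by
  intro s i j _ hpre
  unfold Spec_get_optimal_order get_optimal_order get_optimal_order_alt
  have h := pv_main s (pvN s) i j hpre (pvCard_le_pvN s (i, j))
  obtain ⟨e, he, hloop⟩ := h.2
  have hfe : 4 ^ pvN s = e + (4 ^ pvN s - e) := by omega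
  rw [hfe, hloop, pvLoopB_nil]
  simp
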